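-- pv_equiv track=rewrite | github.com/wzsyf/Python-Code | visual-chameleon/GetMaxCommonSubStrV3.py | calSimilarSubStr
-- ===== SOURCE A (Python) =====
-- def calSimilarSubStr(dic, column):
--
--     allCommonSubStr = {}
--
--     for key, value in dic.items():
--
--         # 去重,对每个Name下的{subStr:subStrLen}进行倒序排序，并取出第一个元素
--         dics = sorted(value.items(), key=lambda item: item[1], reverse=True)
--         similarSubStr = dics[0][0]
--         subStr2NameAndBrand = allCommonSubStr.get(similarSubStr)
--
--         # {Name: Brand}
--         if subStr2NameAndBrand is None:
--             commonStr2NameAndBrand = {}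
--             commonStr2NameAndBrand[key] = column.get(key)
--
--             allCommonSubStr[similarSubStr] = commonStr2NameAndBrand
--         else:
--             subStr2NameAndBrand[key] = column.get(key)
--             allCommonSubStr[similarSubStr] =subStr2NameAndBrand
--
--
--     return allCommonSubStr
-- ===== SOURCE B (Python) =====
-- def calSimilarSubStr(dic, column):
--     # pick each key's representative substring in one max-scan, then group linearly
--     rep = [(key, max(value.items(), key=lambda it: it[1])[0]) for key, value in dic.items()]
--     groups = {}
--     for k, r in rep:
--         groups.setdefault(r, []).append((k, column.get(k)))
--     return {r: dict(pairs) for r, pairs in groups.items()}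
-- ===== Notes on version B (the rewrite author's own statement) =====
-- stated objective: alternative
-- what changed: B replaces A's incremental nested-dict accumulation (sort each value dict descending, take the head, branch on get and update a growing dict-of-dicts) with a map/group/assemble pipeline: one pass picks each key's representative via max with a key function, one pass groups (key, brand) pairs per representative with setdefault, and a final comprehension assembles the result dicts.
-- outside the precondition, e.g. on calSimilarSubStr({'a': {'s': 1}}, {}): A returns {'s': {'a': None}}, B returns {'s': {'a': None}}
import Mathlib
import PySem

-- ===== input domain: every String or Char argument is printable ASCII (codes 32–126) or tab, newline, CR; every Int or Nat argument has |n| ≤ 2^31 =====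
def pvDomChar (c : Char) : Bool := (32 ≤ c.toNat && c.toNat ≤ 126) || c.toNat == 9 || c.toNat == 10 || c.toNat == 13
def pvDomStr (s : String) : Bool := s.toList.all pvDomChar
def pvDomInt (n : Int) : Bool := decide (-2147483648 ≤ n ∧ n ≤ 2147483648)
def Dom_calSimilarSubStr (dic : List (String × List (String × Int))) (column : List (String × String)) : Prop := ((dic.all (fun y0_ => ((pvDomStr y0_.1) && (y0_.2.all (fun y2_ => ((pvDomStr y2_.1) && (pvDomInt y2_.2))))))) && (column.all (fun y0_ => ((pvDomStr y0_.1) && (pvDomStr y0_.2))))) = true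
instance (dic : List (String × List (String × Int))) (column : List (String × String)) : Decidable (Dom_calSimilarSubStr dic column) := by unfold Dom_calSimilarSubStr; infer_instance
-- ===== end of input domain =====

-- B replaces A's incremental nested-dict accumulation by a map / group / assemble pipeline (objective: alternative; return value only).

-- ===== PORT A =====
def calSimilarSubStr (dic : List (String × List (String × Int))) (column : List (String × String)) : List (String × List (String × String)) :=
  (dic.foldl (fun (acc : PySem.Dict String (PySem.Dict String String)) kv =>
      let dics := PySem.List.sorted kv.2 (fun item => item.2) true
      -- dics[0] raises IndexError when the value dict is empty (excluded by Pre_); totalised with headD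
      let similarSubStr := (dics.headD (("", 0) : String × Int)).1
      -- column.get(key) is None when key is absent (excluded by Pre_); totalised with getD ""
      let colv := ((PySem.Dict.mk column).get? kv.1).getD ""
      match acc.get? similarSubStr with
      | none => acc.insert similarSubStr (PySem.Dict.empty.insert kv.1 colv)
      | some d => acc.insert similarSubStr (d.insert kv.1 colv))
    PySem.Dict.empty).items.map (fun p => (p.1, p.2.items))

-- ===== PORT B =====
def calSimilarSubStr_alt (dic : List (String × List (String × Int))) (column : List (String × String)) : List (String × List (String × String)) :=
  let rep := dic.map (fun kv => (kv.1, ((PySem.List.max? kv.2 (fun it => it.2)).getD (("", 0) : String × Int)).1))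
  -- groups.setdefault(r, []).append(pair) sets groups[r] = groups.get(r, []) + [pair], i.e. Dict.modify
  let groups := rep.foldl (fun (g : PySem.Dict String (List (String × String))) p =>
      g.modify p.2 [] (fun ps => ps ++ [(p.1, ((PySem.Dict.mk column).get? p.1).getD "")])) PySem.Dict.empty
  groups.items.map (fun q => (q.1, (PySem.Dict.ofList q.2).items))

-- ===== PRECONDITION & SPEC =====
-- Pre_ excludes inputs where A raises (an empty inner value dict: IndexError) or stores a non-string
-- (a dic key absent from column: A stores None, outside the declared String value type), and assoc
-- lists whose dic keys repeat, which no Python dict argument can produce.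
def Pre_calSimilarSubStr (dic : List (String × List (String × Int))) (column : List (String × String)) : Prop :=
  (dic.map (fun kv => kv.1)).Nodup ∧ ∀ kv ∈ dic, kv.2 ≠ [] ∧ kv.1 ∈ column.map (fun c => c.1)
instance (dic : List (String × List (String × Int))) (column : List (String × String)) : Decidable (Pre_calSimilarSubStr dic column) := by unfold Pre_calSimilarSubStr; infer_instance

def pvWitness_calSimilarSubStr : (List (String × List (String × Int))) × (List (String × String)) :=
  ([("a", [("s", 2), ("t", 1)]), ("b", [("s", 3)])], [("a", "B"), ("b", "C")])

def Spec_calSimilarSubStr (dic : List (String × List (String × Int))) (column : List (String × String)) (out : List (String × List (String × String))) : Prop := out = calSimilarSubStr_alt dic column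
instance (dic : List (String × List (String × Int))) (column : List (String × String)) (out : List (String × List (String × String))) : Decidable (Spec_calSimilarSubStr dic column out) := by unfold Spec_calSimilarSubStr; infer_instance

-- ===== CLAIM (what is proved, stated in full; the proofs are below) =====
def Claim_equal_calSimilarSubStr : Prop := ∀ (dic : List (String × List (String × Int))) (column : List (String × String)), Dom_calSimilarSubStr dic column → Pre_calSimilarSubStr dic column → Spec_calSimilarSubStr dic column (calSimilarSubStr dic column)

-- ===== LEMMAS AND PROOFS =====

-- proof-side shorthands
def pvCol (column : List (String × String)) (k : String) : String :=
  ((PySem.Dict.mk column).get? k).getD ""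
def pvRep (value : List (String × Int)) : String :=
  ((PySem.List.max? value (fun it => it.2)).getD (("", 0) : String × Int)).1

lemma pv_foldl_insertBy_head (xs : List (String × Int)) :
    ∀ (m : String × Int) (rest : List (String × Int)),
    ∃ rest', xs.foldl (fun acc x => PySem.List.insertBy (fun a b => decide (b.2 < a.2)) x acc) (m :: rest)
      = (xs.foldl (fun m x => if m.2 < x.2 then x else m) m) :: rest' := by
  induction xs with
  | nil => intro m rest; exact ⟨rest, rfl⟩
  | cons x t ih =>
    intro m rest
    simp only [List.foldl_cons, PySem.List.insertBy]
    by_cases h : m.2 < x.2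
    · simp only [h, decide_true, if_true]
      exact ih x (m :: rest)
    · simp only [h, decide_false, if_false]
      exact ih m _

lemma pv_max_cons (x : String × Int) (t : List (String × Int)) :
    PySem.List.max? (x :: t) (fun it => it.2) = some (t.foldl (fun m y => if m.2 < y.2 then y else m) x) := by
  induction t generalizing x with
  | nil => rfl
  | cons y t ih =>
    have h1 : PySem.List.max? (x :: y :: t) (fun it => it.2)
        = PySem.List.max? ((if x.2 < y.2 then y else x) :: t) (fun it => it.2) := by
      simp only [PySem.List.max?, List.foldl_cons]
      by_cases h : x.2 < y.2 <;> simp [h]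
    rw [h1, ih]
    simp only [List.foldl_cons]

lemma pv_sorted_head_eq_max (l : List (String × Int)) (h : l ≠ []) :
    (PySem.List.sorted l (fun item => item.2) true).headD (("", 0) : String × Int)
      = (PySem.List.max? l (fun it => it.2)).getD (("", 0) : String × Int) := by
  cases l with
  | nil => exact absurd rfl h
  | cons x t =>
    rw [PySem.List.sorted_rev_eq_foldl_insertBy]
    rw [pv_max_cons]
    simp only [List.foldl_cons, PySem.List.insertBy]
    obtain ⟨rest', hr⟩ := pv_foldl_insertBy_head t x []
    rw [hr]
    rfl

def pvStep (acc : PySem.Dict String (PySem.Dict String String)) (p : String × String × String) :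
    PySem.Dict String (PySem.Dict String String) :=
  match acc.get? p.1 with
  | none => acc.insert p.1 (PySem.Dict.empty.insert p.2.1 p.2.2)
  | some d => acc.insert p.1 (d.insert p.2.1 p.2.2)
def pvGroup (l : List (String × String × String)) : PySem.Dict String (PySem.Dict String String) :=
  l.foldl pvStep PySem.Dict.empty

lemma pv_dedup_append (xs : List String) (x : String) :
    PySem.List.dedup (xs ++ [x])
      = if x ∈ xs then PySem.List.dedup xs else PySem.List.dedup xs ++ [x] := by
  have hc : (PySem.Set.ofList xs).contains x = true ↔ x ∈ xs := by
    simp [PySem.Set.contains, PySem.Set.mem_ofList]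
  have key : PySem.List.dedup (xs ++ [x]) = PySem.Set.add (PySem.Set.ofList xs) x := by
    simp [PySem.List.dedup, PySem.Set.ofList, List.foldl_append]
  rw [key, PySem.Set.add]
  by_cases h : x ∈ xs
  · simp [h, PySem.List.dedup]
  · have hne : (PySem.Set.ofList xs).contains x ≠ true := fun hcon => h (hc.mp hcon)
    simp [h, PySem.List.dedup]

lemma pv_get?_map (xs : List String) (a : String)
    (hnd : xs.Nodup) (ha : a ∈ xs) (f : String → PySem.Dict String String) :
    (PySem.Dict.mk (xs.map (fun r => (r, f r)))).get? a = some (f a) := by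
  apply PySem.Dict.get?_of_mem_items
  · exact List.mem_map_of_mem ha
  · simp only [PySem.Dict.keys, List.map_map]
    have h2 : ((fun x => x.1) ∘ fun r => ((r, f r) : String × PySem.Dict String String)) = id := by
      funext r; rfl
    rw [h2, List.map_id]; exact hnd

lemma pv_group_spec (l : List (String × String × String))
    (hnd : (l.map (fun p => p.2.1)).Nodup) :
    pvGroup l = PySem.Dict.mk ((PySem.List.dedup (l.map (fun p => p.1))).map
      (fun r => (r, PySem.Dict.mk ((l.filter (fun p => p.1 == r)).map (fun p => p.2))))) := by
  induction l using List.reverseRecOn with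
  | nil => rfl
  | append_singleton l p ih =>
    simp only [List.map_append, List.map_cons, List.map_nil] at hnd
    have hnd' : (l.map (fun p => p.2.1)).Nodup := (List.nodup_append.mp hnd).1
    have hkey : p.2.1 ∉ l.map (fun p => p.2.1) := by
      have := List.nodup_append.mp hnd
      intro hm
      exact this.2.2 _ hm _ (List.mem_singleton_self _) rfl
    have IH := ih hnd'
    have hfold : pvGroup (l ++ [p]) = pvStep (pvGroup l) p := by
      simp [pvGroup, List.foldl_append]
    set rs := l.map (fun p => p.1) with hrs
    have hdk : (PySem.List.dedup rs).Nodup := by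
      simp [PySem.List.dedup, PySem.Set.nodup_ofList]
    have hmemdk : ∀ r, r ∈ PySem.List.dedup rs ↔ r ∈ rs := by
      intro r; simp [PySem.List.dedup, PySem.Set.mem_ofList]
    have hmapfst : (l ++ [p]).map (fun p => p.1) = rs ++ [p.1] := by simp [hrs]
    rw [hfold, IH, hmapfst, pv_dedup_append]
    by_cases hp : p.1 ∈ rs
    · -- existing group: in-place update
      have hget : (PySem.Dict.mk ((PySem.List.dedup rs).map
          (fun r => (r, PySem.Dict.mk ((l.filter (fun q => q.1 == r)).map (fun q => q.2)))))).get? p.1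
          = some (PySem.Dict.mk ((l.filter (fun q => q.1 == p.1)).map (fun q => q.2))) :=
        pv_get?_map _ _ hdk ((hmemdk _).mpr hp) _
      rw [pvStep, hget]
      have hcontains : (PySem.Dict.mk ((PySem.List.dedup rs).map
          (fun r => (r, PySem.Dict.mk ((l.filter (fun q => q.1 == r)).map (fun q => q.2)))))).contains p.1 = true := by
        rw [PySem.Dict.contains_eq_isSome_get?, hget]; rfl
      have hinner : (PySem.Dict.mk ((l.filter (fun q => q.1 == p.1)).map (fun q => q.2))).contains p.2.1 = false := by
        rw [Bool.eq_false_iff]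
        intro hcon
        simp only [PySem.Dict.contains, List.any_eq_true] at hcon
        obtain ⟨q, hq, hq2⟩ := hcon
        simp only [List.mem_map, List.mem_filter] at hq
        obtain ⟨w, ⟨hwl, _⟩, hwq⟩ := hq
        apply hkey
        refine List.mem_map.mpr ⟨w, hwl, ?_⟩
        have : q.1 = p.2.1 := by simpa using hq2
        rw [← hwq] at this
        exact this
      apply PySem.Dict.ext
      rw [PySem.Dict.items_insert_of_contains _ _ hcontains]
      simp only [hp, if_true]
      rw [List.map_map]
      apply List.map_congr_left
      intro r hr
      by_cases hrp : r = p.1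
      · subst hrp
        simp only [Function.comp, beq_self_eq_true, if_true]
        rw [PySem.Dict.insert]
        simp only [hinner, Bool.false_eq_true, if_false]
        simp [List.filter_append]
      · have : (r == p.1) = false := by simp [hrp]
        simp only [Function.comp, this, Bool.false_eq_true, if_false]
        have hne2 : p.1 ≠ r := fun h => hrp (Eq.symm h)
        have hpf : (p.1 == r) = false := by simp [hne2]
        simp [List.filter_append, hpf]
    · -- fresh group: append
      have hnotmem : p.1 ∉ (PySem.List.dedup rs) := fun h => hp ((hmemdk _).mp h)
      have hget : (PySem.Dict.mk ((PySem.List.dedup rs).map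
          (fun r => (r, PySem.Dict.mk ((l.filter (fun q => q.1 == r)).map (fun q => q.2)))))).get? p.1 = none := by
        rw [PySem.Dict.get?_eq_none_iff_not_mem_keys]
        simp only [PySem.Dict.keys, List.map_map]
        intro hmem
        apply hnotmem
        simpa using hmem
      have hcontains : (PySem.Dict.mk ((PySem.List.dedup rs).map
          (fun r => (r, PySem.Dict.mk ((l.filter (fun q => q.1 == r)).map (fun q => q.2)))))).contains p.1 = false := by
        rw [PySem.Dict.contains_eq_isSome_get?, hget]; rfl
      rw [pvStep, hget]
      apply PySem.Dict.ext
      rw [PySem.Dict.items_insert_of_not_contains _ _ hcontains]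
      simp only [hp, if_false, List.map_append]
      congr 1
      · apply List.map_congr_left
        intro r hr
        have hrrs : r ∈ rs := (hmemdk _).mp hr
        have hpf : (p.1 == r) = false := by
          have : p.1 ≠ r := fun h => hp (h ▸ hrrs)
          simp [this]
        simp [List.filter_append, hpf]
      · have hfilt : l.filter (fun q => q.1 == p.1) = [] := by
          rw [List.filter_eq_nil_iff]
          intro q hq
          have : q.1 ∈ rs := List.mem_map.mpr ⟨q, hq, rfl⟩
          simp only [beq_iff_eq]
          intro he
          exact hp (he ▸ this)
        have : PySem.Dict.empty.insert p.2.1 p.2.2 = PySem.Dict.mk [(p.2.1, p.2.2)] := rfl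
        simp [List.filter_append, hfilt, this]

theorem pv_main (dic : List (String × List (String × Int))) (column : List (String × String))
    (hpre : Pre_calSimilarSubStr dic column) :
    calSimilarSubStr dic column = calSimilarSubStr_alt dic column := by
  obtain ⟨hnodup, hvals⟩ := hpre
  -- 1. A's fold is pvGroup over the mapped triples
  have hA : calSimilarSubStr dic column
      = (pvGroup (dic.map (fun kv => (pvRep kv.2, kv.1, pvCol column kv.1)))).items.map
          (fun q => (q.1, q.2.items)) := by
    unfold calSimilarSubStr pvGroup
    rw [List.foldl_map]
    congr 2
    apply PySem.List.foldl_congr_mem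
    intro acc kv hkv
    show (match acc.get? ((PySem.List.sorted kv.2 (fun item => item.2) true).headD (("", 0) : String × Int)).1 with
      | none => acc.insert _ (PySem.Dict.empty.insert kv.1 (((PySem.Dict.mk column).get? kv.1).getD ""))
      | some d => acc.insert _ (d.insert kv.1 (((PySem.Dict.mk column).get? kv.1).getD ""))) = _
    rw [pv_sorted_head_eq_max kv.2 (hvals kv hkv).1]
    rfl
  rw [hA, pv_group_spec]
  swap
  · simpa [List.map_map, Function.comp] using hnodup
  -- 2. B's grouping fold, viewed over the (rep, pair) list
  unfold calSimilarSubStr_alt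
  show _ = ((dic.map (fun kv => (kv.1, ((PySem.List.max? kv.2 (fun it => it.2)).getD (("", 0) : String × Int)).1))).foldl
      (fun (g : PySem.Dict String (List (String × String))) p =>
        g.modify p.2 [] (fun ps => ps ++ [(p.1, ((PySem.Dict.mk column).get? p.1).getD "")])) PySem.Dict.empty).items.map
      (fun q => (q.1, (PySem.Dict.ofList q.2).items))
  have hfold : (dic.map (fun kv => (kv.1, ((PySem.List.max? kv.2 (fun it => it.2)).getD (("", 0) : String × Int)).1))).foldl
        (fun (g : PySem.Dict String (List (String × String))) p =>
          g.modify p.2 [] (fun ps => ps ++ [(p.1, ((PySem.Dict.mk column).get? p.1).getD "")])) PySem.Dict.empty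
      = ((dic.map (fun kv => (pvRep kv.2, (kv.1, pvCol column kv.1)))).foldl
          (fun (g : PySem.Dict String (List (String × String))) p =>
            g.modify p.1 [] (fun ps => ps ++ [p.2])) PySem.Dict.empty) := by
    rw [List.foldl_map, List.foldl_map]
    rfl
  rw [hfold]
  set lp := dic.map (fun kv => (pvRep kv.2, (kv.1, pvCol column kv.1))) with hlp
  set G := lp.foldl (fun (g : PySem.Dict String (List (String × String))) p =>
      g.modify p.1 [] (fun ps => ps ++ [p.2])) PySem.Dict.empty with hG
  have hGfun : G = lp.foldl (fun g p => g.modify p.1 [] ((fun (_ : PySem.Dict String (List (String × String))) (_ : String × String × String) (ps : List (String × String)) => ps ++ [p.2]) g p)) PySem.Dict.empty := rfl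
  have hknd : G.keys.Nodup := by
    rw [hGfun]
    exact PySem.Dict.nodup_keys_foldl_modify_key lp (fun p => p.1) [] _ _ (by simp [PySem.Dict.keys, PySem.Dict.empty])
  have hkeys : G.keys = PySem.List.dedup (lp.map (fun p => p.1)) := by
    rw [hGfun]
    rw [PySem.Dict.keys_foldl_modify_key lp (fun p => p.1) [] _ _]
    simp [PySem.Dict.keys, PySem.Dict.empty, PySem.Set.update, PySem.List.dedup, PySem.Set.ofList]
  have hgetD : ∀ r, G.getD r [] = (lp.filter (fun p => p.1 == r)).map (fun p => p.2) := by
    intro r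
    rw [hG, PySem.Dict.getD_foldl_modify_append lp PySem.Dict.empty r]
    simp [PySem.Dict.getD, PySem.Dict.get?, PySem.Dict.empty]
  rw [PySem.Dict.items_eq_map_keys G hknd [], hkeys]
  have hlps : lp.map (fun p => p.1) = (dic.map (fun kv => (pvRep kv.2, kv.1, pvCol column kv.1))).map (fun p => p.1) := by
    simp only [hlp, List.map_map]
  rw [hlps]
  simp only [List.map_map]
  apply List.map_congr_left
  intro r hr
  simp only [Function.comp_apply, hgetD r]
  congr 1
  -- dict(pairs) over distinct keys is the pair list itself
  have hsub : (((lp.filter (fun p => p.1 == r)).map (fun p => p.2)).map (fun q => q.1)).Nodup := by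
    have h2 : ((lp.map (fun p => p.2)).map (fun q => q.1)).Nodup := by
      simpa [hlp, List.map_map, Function.comp] using hnodup
    exact h2.sublist (List.Sublist.map _ (List.Sublist.map _ List.filter_sublist))
  have hfresh := PySem.Dict.items_foldl_insert_fresh
      ((lp.filter (fun p => p.1 == r)).map (fun p => p.2))
      (fun q => q.1) (fun q => q.2) PySem.Dict.empty
      (by intro a _; exact PySem.Dict.contains_empty _) hsub
  show _ = (PySem.Dict.ofList _).items
  rw [PySem.Dict.ofList, PySem.Dict.update, hfresh]
  simp [PySem.Dict.empty]

-- ===== VERDICT (by name: the statement is the Claim_ definition above) =====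
theorem calSimilarSubStr_spec : Claim_equal_calSimilarSubStr := by
  intro dic column _hdom hpre
  unfold Spec_calSimilarSubStr
  exact pv_main dic column hpre
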